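-- pv_equiv track=rewrite | github.com/suman1209/UTN_VLM_reasoning | src_code/eval_utils/eval.py | convert_commands_to_path
-- ===== SOURCE A (Python) =====
-- MOVE_MAP = {
--     "go up": (-1, 0),
--     "go down": (1, 0),
--     "go left": (0, -1),
--     "go right": (0, 1)
-- }
--
-- def convert_commands_to_path(start, commands):
--     """Convert movement commands into a list of coordinates."""
--     path = [start]
--     x, y = start
--     for command in commands:
--         if command in MOVE_MAP:
--             dx, dy = MOVE_MAP[command]
--             path.append((x + dx, y + dy))
--             x += dx
--             y += dy
--     return path
-- ===== SOURCE B (Python) =====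
-- MOVE_MAP = {
--     "go up": (-1, 0),
--     "go down": (1, 0),
--     "go left": (0, -1),
--     "go right": (0, 1)
-- }
--
-- def convert_commands_to_path(start, commands):
--     """Convert movement commands into a list of coordinates (divide and conquer)."""
--     if not commands:
--         return [start]
--     if len(commands) == 1:
--         d = MOVE_MAP.get(commands[0])
--         if d is None:
--             return [start]
--         return [start, (start[0] + d[0], start[1] + d[1])]
--     mid = len(commands) // 2
--     left = convert_commands_to_path(start, commands[:mid])
--     right = convert_commands_to_path(left[-1], commands[mid:])
--     return left + right[1:]
-- ===== Notes on version B (the rewrite author's own statement) =====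
-- stated objective: alternative
-- what changed: Replaces A's stateful left-to-right x/y loop with a divide-and-conquer recursion: split the command list in half, compute the left half's path, compute the right half's path seeded with the left path's last point, and join them (dropping the duplicated join point).
import Mathlib
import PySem

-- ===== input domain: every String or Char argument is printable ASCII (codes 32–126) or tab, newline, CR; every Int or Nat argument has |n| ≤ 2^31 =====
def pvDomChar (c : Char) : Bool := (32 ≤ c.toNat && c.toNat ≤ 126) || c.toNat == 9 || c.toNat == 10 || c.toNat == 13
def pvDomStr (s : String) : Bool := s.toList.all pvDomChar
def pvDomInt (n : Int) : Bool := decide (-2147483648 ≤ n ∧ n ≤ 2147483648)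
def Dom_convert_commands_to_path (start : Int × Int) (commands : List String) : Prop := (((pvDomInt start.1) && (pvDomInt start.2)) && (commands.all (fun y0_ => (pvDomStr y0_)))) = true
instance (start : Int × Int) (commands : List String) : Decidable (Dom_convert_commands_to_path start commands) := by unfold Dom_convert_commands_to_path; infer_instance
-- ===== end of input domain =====

-- B replaces A's stateful x/y loop with a divide-and-conquer recursion on the command list (alternative decomposition; return value only).


-- ===== PORT A =====
def MOVE_MAP : PySem.Dict String (Int × Int) :=
  PySem.Dict.ofList [("go up", (-1, 0)), ("go down", (1, 0)), ("go left", (0, -1)), ("go right", (0, 1))]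

-- the for-loop of A, carrying (path, x, y); 'command in MOVE_MAP' + lookup = match on get?
def convLoopA : List String → List (Int × Int) → Int → Int → List (Int × Int)
  | [], path, _, _ => path
  | command :: rest, path, x, y =>
    match PySem.Dict.get? MOVE_MAP command with
    | some (dx, dy) => convLoopA rest (path ++ [(x + dx, y + dy)]) (x + dx) (y + dy)
    | none => convLoopA rest path x y

def convert_commands_to_path (start : Int × Int) (commands : List String) : List (Int × Int) :=
  convLoopA commands [start] start.1 start.2

-- ===== PORT B =====
-- divide and conquer: commands[:mid] / commands[mid:] with 0 ≤ mid ≤ len are take/drop;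
-- left[-1] is getLast! (the recursive result is always nonempty, so Python never raises here)
def convert_commands_to_path_alt (start : Int × Int) (commands : List String) : List (Int × Int) :=
  match commands with
  | [] => [start]
  | [c] =>
    match PySem.Dict.get? MOVE_MAP c with
    | none => [start]
    | some d => [start, (start.1 + d.1, start.2 + d.2)]
  | c1 :: c2 :: rest =>
    let cs := c1 :: c2 :: rest
    let mid := cs.length / 2
    let left := convert_commands_to_path_alt start (cs.take mid)
    let right := convert_commands_to_path_alt left.getLast! (cs.drop mid)
    left ++ right.tail
termination_by commands.length
decreasing_by
  · simp only [List.length_take, List.length_cons]; omega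
  · simp only [List.length_drop, List.length_cons]; omega

-- ===== PRECONDITION & SPEC =====
def Spec_convert_commands_to_path (start : Int × Int) (commands : List String) (out : List (Int × Int)) : Prop := out = convert_commands_to_path_alt start commands
instance (start : Int × Int) (commands : List String) (out : List (Int × Int)) : Decidable (Spec_convert_commands_to_path start commands out) := by unfold Spec_convert_commands_to_path; infer_instance

-- ===== CLAIM (what is proved, stated in full; the proofs are below) =====
def Claim_equal_convert_commands_to_path : Prop := ∀ (start : Int × Int) (commands : List String), Dom_convert_commands_to_path start commands → Spec_convert_commands_to_path start commands (convert_commands_to_path start commands)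

-- ===== LEMMAS AND PROOFS =====
theorem getLast!_singleton_pair (a : Int × Int) : ([a]).getLast! = a := by
  simp [List.getLast!_eq_getLast?_getD]

theorem getLast!_cons_ne_nil (a : Int × Int) (l : List (Int × Int)) (h : l ≠ []) :
    (a :: l).getLast! = l.getLast! := by
  cases l with
  | nil => exact absurd rfl h
  | cons b t => simp [List.getLast!_eq_getLast?_getD, List.getLast?_cons_cons]

-- canonical reference path, used only in the proofs
def simplePath : Int × Int → List String → List (Int × Int)
  | s, [] => [s]
  | s, c :: rest =>
    match PySem.Dict.get? MOVE_MAP c with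
    | none => simplePath s rest
    | some d => s :: simplePath (s.1 + d.1, s.2 + d.2) rest

theorem simplePath_cons_tail (s : Int × Int) (cs : List String) :
    simplePath s cs = s :: (simplePath s cs).tail := by
  induction cs generalizing s with
  | nil => simp [simplePath]
  | cons c rest ih =>
    simp only [simplePath]
    cases PySem.Dict.get? MOVE_MAP c with
    | none => exact ih s
    | some d => simp

theorem simplePath_ne_nil (s : Int × Int) (cs : List String) : simplePath s cs ≠ [] := by
  rw [simplePath_cons_tail]; simp

theorem simplePath_append (s : Int × Int) (l r : List String) :
    simplePath s (l ++ r) = simplePath s l ++ (simplePath (simplePath s l).getLast! r).tail := by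
  induction l generalizing s with
  | nil =>
    simp only [List.nil_append, simplePath, getLast!_singleton_pair]
    exact simplePath_cons_tail s r
  | cons c l ih =>
    simp only [List.cons_append, simplePath]
    cases PySem.Dict.get? MOVE_MAP c with
    | none => exact ih s
    | some d =>
      have hne := simplePath_ne_nil (s.1 + d.1, s.2 + d.2) l
      simp only [ih, getLast!_cons_ne_nil _ _ hne, List.cons_append]

theorem convLoopA_eq_simple (cmds : List String) :
    ∀ (p : List (Int × Int)) (x y : Int),
      convLoopA cmds p x y = p ++ (simplePath (x, y) cmds).tail := by
  induction cmds with
  | nil => intro p x y; simp [convLoopA, simplePath]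
  | cons c rest ih =>
    intro p x y
    cases h : PySem.Dict.get? MOVE_MAP c with
    | none => simp [convLoopA, h, ih, simplePath]
    | some d =>
      obtain ⟨dx, dy⟩ := d
      simp only [convLoopA, h, ih, simplePath]
      rw [simplePath_cons_tail (x + dx, y + dy) rest]
      simp

theorem alt_eq_simple (start : Int × Int) (commands : List String) :
    convert_commands_to_path_alt start commands = simplePath start commands := by
  fun_induction convert_commands_to_path_alt start commands with
  | case1 => simp [simplePath]
  | case2 s c h => simp [simplePath, h]
  | case3 s c d h => simp [simplePath, h]
  | case4 s c1 c2 rest cs mid left right ih1 ih2 ih3 =>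
    clear ih2
    simp only [cs, mid, left, right] at ih1 ih3 ⊢
    rw [ih1] at ih3 ⊢
    rw [ih3, ← simplePath_append, List.take_append_drop]

-- ===== VERDICT (by name: the statement is the Claim_ definition above) =====
theorem convert_commands_to_path_spec : Claim_equal_convert_commands_to_path := by
  intro start commands _
  unfold Spec_convert_commands_to_path convert_commands_to_path
  rw [alt_eq_simple, convLoopA_eq_simple]
  exact (simplePath_cons_tail start commands).symm
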